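-- pv_equiv track=rewrite | github.com/MahmadSharaf/Algorithmic-Toolbox | Week 2- Algorthmic warmup/7. Last digit of the sum of Fibonacci numbers again/fibonacci_partial_sum.py | get_pisano_sequence
-- ===== SOURCE A (Python) =====
-- def get_pisano_sequence(n):
--     '''This Function calculates the Pisano Period'''
--     arr=[0,1]
--     current=1
--     previous=1
--     index=2
--     while True:
--         new=(arr[index-1]+arr[index-2])
--         arr.append(new%n)
--         previous=current
--         current=arr[index]
--         index+=1
--         if (current==1 and previous==0):
--             arr.pop()
--             arr.pop()
--             break
--     return arr
-- ===== SOURCE B (Python) =====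
-- def get_pisano_sequence(n):
--     '''This Function calculates the Pisano Period'''
--     # Pass 1: find the period length by advancing a rolling pair until (0, 1) recurs.
--     a, b = 0, 1
--     period = 0
--     while True:
--         a, b = b, (a + b) % n
--         period += 1
--         if a == 0 and b == 1:
--             break
--     # Pass 2: regenerate exactly `period` Fibonacci residues from scratch.
--     seq = []
--     a, b = 0, 1
--     for _ in range(period):
--         seq.append(a)
--         a, b = b, (a + b) % n
--     return seq
-- ===== Notes on version B (the rewrite author's own statement) =====
-- stated objective: alternative
-- what changed: B splits the work into two staged passes: a first loop that only counts the period length with a rolling pair (building nothing), and a second bounded for-loop that regenerates exactly that many Fibonacci residues; A instead grows one indexed list inside a single while-loop, reads the recurrence back out of it, overshoots and pops two trailing elements.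
-- outside the precondition, e.g. on get_pisano_sequence(0): A raises ZeroDivisionError, B raises ZeroDivisionError
import Mathlib
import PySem

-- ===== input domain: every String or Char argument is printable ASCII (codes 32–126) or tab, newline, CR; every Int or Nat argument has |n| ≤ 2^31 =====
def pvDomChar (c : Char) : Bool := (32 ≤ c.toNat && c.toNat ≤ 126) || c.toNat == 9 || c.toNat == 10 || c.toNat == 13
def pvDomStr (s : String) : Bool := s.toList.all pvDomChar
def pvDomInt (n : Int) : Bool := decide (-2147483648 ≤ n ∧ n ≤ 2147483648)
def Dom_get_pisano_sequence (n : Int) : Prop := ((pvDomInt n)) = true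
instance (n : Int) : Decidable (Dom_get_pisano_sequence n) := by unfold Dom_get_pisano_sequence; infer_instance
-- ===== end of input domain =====

-- B computes the period length first with a rolling pair, then regenerates the residues in a
-- second bounded pass; A grows one indexed list and trims a two-element overshoot.
-- Both Pythons loop forever on n ≤ 1 (n = 0 raises ZeroDivisionError), so the ports carry a fuel
-- bound of 6*n+1 steps (the Pisano period never exceeds 6n); on fuel exhaustion both return [].

-- ===== PORT A =====
-- Literal port of A's while-True loop; state = (arr, current, index); 'previous' is set fresh each
-- iteration from 'current' before use (its initial value 1 is dead), so it is not loop state.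
-- arr[index-1]/arr[index-2]/arr[index] via pyGet?; none (IndexError, never reached) aborts with none.
def pisA_loop (n : Int) : Nat → List Int → Int → Int → Option (List Int)
  | 0, _, _, _ => none
  | fuel + 1, arr, current, index =>
    match PySem.List.pyGet? arr (index - 1), PySem.List.pyGet? arr (index - 2) with
    | some a, some b =>
      let new := a + b
      let arr2 := arr ++ [PySem.Int.mod new n]
      let previous := current
      match PySem.List.pyGet? arr2 index with
      | some c =>
        if c = 1 ∧ previous = 0 then
          some arr2.dropLast.dropLast   -- arr.pop(); arr.pop() on a list of length ≥ 3
        else pisA_loop n fuel arr2 c (index + 1)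
      | none => none
    | _, _ => none

def get_pisano_sequence (n : Int) : List Int :=
  (pisA_loop n ((6 * n).toNat + 1) [0, 1] 1 2).getD []

-- ===== PORT B =====
-- Pass 1 of Source B: advance the rolling pair (a, b), counting steps in `period`, until (0, 1) recurs.
def pisB_period (n : Int) : Nat → Int → Int → Nat → Option Nat
  | 0, _, _, _ => none
  | fuel + 1, a, b, period =>
    let a2 := b
    let b2 := PySem.Int.mod (a + b) n
    let period2 := period + 1
    if a2 = 0 ∧ b2 = 1 then some period2
    else pisB_period n fuel a2 b2 period2

-- Pass 2 of Source B: the bounded for-loop appending `a` and advancing the pair, `m` times.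
def pisB_gen (n : Int) : Nat → Int → Int → List Int
  | 0, _, _ => []
  | m + 1, a, b => a :: pisB_gen n m b (PySem.Int.mod (a + b) n)

def get_pisano_sequence_alt (n : Int) : List Int :=
  match pisB_period n ((6 * n).toNat + 1) 0 1 0 with
  | some p => pisB_gen n p 0 1
  | none => []

-- ===== PRECONDITION & SPEC =====
-- Pre_ excludes n ≤ 1: on n = 0 Python A raises ZeroDivisionError, and on n = 1 or n < 0 the
-- appended residues can never equal the literal 1, so A's while-True loop never terminates.
def Pre_get_pisano_sequence (n : Int) : Prop := 2 ≤ n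
instance (n : Int) : Decidable (Pre_get_pisano_sequence n) := by unfold Pre_get_pisano_sequence; infer_instance
def pvWitness_get_pisano_sequence : Int := (10)

def Spec_get_pisano_sequence (n : Int) (out : List Int) : Prop := out = get_pisano_sequence_alt n
instance (n : Int) (out : List Int) : Decidable (Spec_get_pisano_sequence n out) := by unfold Spec_get_pisano_sequence; infer_instance

-- ===== CLAIM (what is proved, stated in full; the proofs are below) =====
def Claim_equal_get_pisano_sequence : Prop := ∀ (n : Int), Dom_get_pisano_sequence n → Pre_get_pisano_sequence n → Spec_get_pisano_sequence n (get_pisano_sequence n)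

-- ===== LEMMAS AND PROOFS =====

-- Proof-only intermediate: a single accumulating pass with rolling scalars.
def pisS_loop (n : Int) : Nat → List Int → Int → Int → Option (List Int)
  | 0, _, _, _ => none
  | fuel + 1, seq, prev, curr =>
    let seq2 := seq ++ [prev]
    let prev2 := curr
    let curr2 := PySem.Int.mod (prev + curr) n
    if prev2 = 0 ∧ curr2 = 1 then some seq2
    else pisS_loop n fuel seq2 prev2 curr2

-- Invariant linking A's loop to the single-pass loop: A's arr is seq followed by the two rolling
-- scalars, A's current equals curr, and A's index is arr's length.
lemma pisA_eq_pisS (n : Int) : ∀ (fuel : Nat) (seq : List Int) (prev curr : Int),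
    pisA_loop n fuel (seq ++ [prev, curr]) curr ((seq.length : Int) + 2)
      = pisS_loop n fuel seq prev curr := by
  intro fuel
  induction fuel with
  | zero => intro seq prev curr; rfl
  | succ fuel ih =>
    intro seq prev curr
    have h1 : PySem.List.pyGet? (seq ++ [prev, curr]) ((seq.length : Int) + 2 - 1)
        = some curr := by
      have : (seq ++ [prev]) ++ [curr] = seq ++ [prev, curr] := by simp
      rw [← this]
      have hl : ((seq.length : Int) + 2 - 1) = ((seq ++ [prev]).length : Int) := by
        simp; omega
      rw [hl]
      simpa using PySem.List.pyGet?_append_length (pre := seq ++ [prev]) (y := curr) (ys := [])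
    have h2 : PySem.List.pyGet? (seq ++ [prev, curr]) ((seq.length : Int) + 2 - 2)
        = some prev := by
      have hl : ((seq.length : Int) + 2 - 2) = (seq.length : Int) := by omega
      rw [hl]
      exact PySem.List.pyGet?_append_length (pre := seq) (y := prev) (ys := [curr])
    have h3 : PySem.List.pyGet? ((seq ++ [prev, curr]) ++ [PySem.Int.mod (curr + prev) n])
        ((seq.length : Int) + 2) = some (PySem.Int.mod (curr + prev) n) := by
      have hre : (seq ++ [prev, curr]) ++ [PySem.Int.mod (curr + prev) n]
          = (seq ++ [prev, curr]) ++ PySem.Int.mod (curr + prev) n :: [] := by simp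
      have hl : ((seq.length : Int) + 2) = ((seq ++ [prev, curr]).length : Int) := by
        simp
      rw [hre, hl]
      exact PySem.List.pyGet?_append_length (pre := seq ++ [prev, curr])
        (y := PySem.Int.mod (curr + prev) n) (ys := [])
    show (match PySem.List.pyGet? (seq ++ [prev, curr]) ((seq.length : Int) + 2 - 1),
            PySem.List.pyGet? (seq ++ [prev, curr]) ((seq.length : Int) + 2 - 2) with
      | some a, some b => _
      | _, _ => none) = _
    rw [h1, h2]
    simp only []
    rw [h3]
    simp only [pisS_loop]
    have hadd : curr + prev = prev + curr := by ring
    by_cases hb : curr = 0 ∧ PySem.Int.mod (prev + curr) n = 1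
    · rw [if_pos (by rw [hadd]; exact ⟨hb.2, hb.1⟩), if_pos hb]
      have : ((seq ++ [prev, curr]) ++ [PySem.Int.mod (curr + prev) n]).dropLast.dropLast
          = seq ++ [prev] := by
        rw [List.dropLast_concat]
        have : seq ++ [prev, curr] = (seq ++ [prev]) ++ [curr] := by simp
        rw [this, List.dropLast_concat]
      rw [this]
    · rw [if_neg (by rw [hadd]; exact fun h => hb ⟨h.2, h.1⟩), if_neg hb]
      have hre : (seq ++ [prev, curr]) ++ [PySem.Int.mod (curr + prev) n]
          = (seq ++ [prev]) ++ [curr, PySem.Int.mod (prev + curr) n] := by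
        rw [hadd]; simp
      have hidx : ((seq.length : Int) + 2) + 1 = (((seq ++ [prev]).length : Int)) + 2 := by
        simp; omega
      rw [hre, hadd, hidx]
      exact ih (seq ++ [prev]) curr (PySem.Int.mod (prev + curr) n)

-- The step counter of B's first pass is a pure accumulator.
lemma pisB_period_shift (n : Int) : ∀ (fuel : Nat) (a b : Int) (k : Nat),
    pisB_period n fuel a b k = (pisB_period n fuel a b 0).map (fun m => m + k) := by
  intro fuel
  induction fuel with
  | zero => intro a b k; rfl
  | succ fuel ih =>
    intro a b k
    simp only [pisB_period]
    split_ifs with h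
    · simp [Nat.add_comm]
    · rw [ih _ _ (k + 1), ih _ _ (0 + 1)]
      simp only [Option.map_map, Function.comp_def]
      congr 1; funext m; omega

-- The single-pass loop equals "count the period, then regenerate".
lemma pisS_eq_two_pass (n : Int) : ∀ (fuel : Nat) (seq : List Int) (a b : Int),
    pisS_loop n fuel seq a b
      = (pisB_period n fuel a b 0).map (fun m => seq ++ pisB_gen n m a b) := by
  intro fuel
  induction fuel with
  | zero => intro seq a b; rfl
  | succ fuel ih =>
    intro seq a b
    simp only [pisS_loop, pisB_period]
    split_ifs with h
    · simp [pisB_gen]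
    · rw [ih (seq ++ [a]) b (PySem.Int.mod (a + b) n),
        pisB_period_shift n fuel b (PySem.Int.mod (a + b) n) (0 + 1)]
      simp only [Option.map_map, Function.comp_def]
      congr 1; funext m
      simp [pisB_gen]

-- ===== VERDICT (by name: the statement is the Claim_ definition above) =====
theorem get_pisano_sequence_spec : Claim_equal_get_pisano_sequence := by
  intro n _ _
  show get_pisano_sequence n = get_pisano_sequence_alt n
  unfold get_pisano_sequence get_pisano_sequence_alt
  have hA := pisA_eq_pisS n ((6 * n).toNat + 1) [] 0 1
  simp only [List.nil_append, List.length_nil, Nat.cast_zero, zero_add] at hA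
  rw [hA, pisS_eq_two_pass]
  cases pisB_period n ((6 * n).toNat + 1) 0 1 0 <;> simp
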